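-- pv_equiv track=rewrite | github.com/Havmaagen/Competitive-programming | 3523. Make Array Non-decreasing.py | maximumPossibleSize
-- ===== SOURCE A (Python) =====
-- def maximumPossibleSize(nums):
--     """
--     :type nums: List[int]
--     :rtype: int
--     """
--
--     answer = 0
--     max_val = 0
--     for num in nums:
--         if num >= max_val:
--             max_val = num
--             answer += 1
--
--     return answer
-- ===== SOURCE B (Python) =====
-- from itertools import accumulate
--
-- def maximumPossibleSize(nums):
--     pm = list(accumulate(nums, max, initial=0))
--     return sum(1 for i, num in enumerate(nums) if num >= pm[i])
-- ===== Notes on version B (the rewrite author's own statement) =====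
-- stated objective: alternative
-- what changed: Replaces A's single interleaved running-max-and-count loop with two passes: first build the prefix-maximum table via itertools.accumulate(initial=0), then count elements at least their strictly-earlier prefix max in a separate pass.
import Mathlib
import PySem

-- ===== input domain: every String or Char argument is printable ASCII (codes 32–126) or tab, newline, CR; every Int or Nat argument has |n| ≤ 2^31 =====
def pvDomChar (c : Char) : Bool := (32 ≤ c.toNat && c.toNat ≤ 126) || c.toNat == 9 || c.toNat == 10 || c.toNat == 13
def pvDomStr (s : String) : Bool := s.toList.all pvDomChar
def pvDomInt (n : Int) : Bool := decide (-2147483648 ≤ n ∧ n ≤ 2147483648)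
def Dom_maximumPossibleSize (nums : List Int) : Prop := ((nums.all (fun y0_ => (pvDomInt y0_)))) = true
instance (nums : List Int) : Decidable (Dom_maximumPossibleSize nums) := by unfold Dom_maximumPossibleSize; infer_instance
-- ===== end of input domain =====

-- B replaces A's interleaved running-max-and-count loop by a prefix-max table pass plus a separate counting pass (alternative decomposition, same cost).

-- ===== PORT A =====
-- single loop carrying (answer, max_val)
def maximumPossibleSize (nums : List Int) : Int :=
  (nums.foldl (fun st num =>
    if num ≥ st.2 then (st.1 + 1, num) else st) ((0 : Int), (0 : Int))).1

-- ===== PORT B =====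
-- pm = accumulate(nums, max, initial=0); then count num ≥ pm[i] (zip truncates pm's extra last entry, matching the enumerate indexing)
def maximumPossibleSize_alt (nums : List Int) : Int :=
  ((nums.zip (List.scanl max 0 nums)).filter (fun p => p.1 ≥ p.2)).length

-- ===== PRECONDITION & SPEC =====
def Spec_maximumPossibleSize (nums : List Int) (out : Int) : Prop := out = maximumPossibleSize_alt nums
instance (nums : List Int) (out : Int) : Decidable (Spec_maximumPossibleSize nums out) := by unfold Spec_maximumPossibleSize; infer_instance

-- ===== CLAIM (what is proved, stated in full; the proofs are below) =====
def Claim_equal_maximumPossibleSize : Prop := ∀ (nums : List Int), Dom_maximumPossibleSize nums → Spec_maximumPossibleSize nums (maximumPossibleSize nums)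

-- ===== LEMMAS AND PROOFS =====

theorem pv_fold_eq_count (nums : List Int) : ∀ (ans m : Int),
    (nums.foldl (fun st num => if num ≥ st.2 then (st.1 + 1, num) else st) (ans, m)).1
      = ans + ((nums.zip (List.scanl max m nums)).filter (fun p => p.1 ≥ p.2)).length := by
  induction nums with
  | nil => intro ans m; simp
  | cons x xs ih =>
    intro ans m
    simp only [List.foldl_cons, List.scanl_cons, List.zip_cons_cons, List.filter_cons]
    by_cases h : x ≥ m
    · have hmax : max m x = x := by omega
      simp [h, ih (ans + 1) x]
      ring
    · have hmax : max m x = m := by omega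
      simp [h, hmax, ih ans m]

-- ===== VERDICT (by name: the statement is the Claim_ definition above) =====
theorem maximumPossibleSize_spec : Claim_equal_maximumPossibleSize := by
  intro nums _
  unfold Spec_maximumPossibleSize maximumPossibleSize maximumPossibleSize_alt
  simpa using pv_fold_eq_count nums 0 0
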